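-- pv_equiv track=rewrite | github.com/msukhare/expert_system | srcs/lexer.py | lexing_line
-- ===== SOURCE A (Python) =====
-- OPERATOR = ('(', ')', '!', '+', '|', '^', '=>', '<=>')
--
-- def check_if_operator(line):
--     for opera in OPERATOR:
--         if line.startswith(opera):
--             return opera
--     return ""
--
-- def lexing_line(line):
--     i = 0
--     tokens = []
--     while (i < len(line)):
--         operator = check_if_operator(line[i:])
--         if operator:
--             i += len(operator)
--             tokens.append(operator)
--         elif line[i] == '#':
--             return tokens
--         else:
--             if line[i].isspace() == False:
--                 tokens.append(line[i])
--             i += 1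
--     return tokens
-- ===== SOURCE B (Python) =====
-- import re
--
-- def lexing_line(line):
--     prefix = line.split('#', 1)[0]
--     return [t for t in re.findall(r'<=>|=>|.', prefix, re.DOTALL) if not t.isspace()]
-- ===== Notes on version B (the rewrite author's own statement) =====
-- stated objective: idiomatic
-- what changed: A's per-position hand-rolled operator-prefix scan with an early comment return is replaced by truncating at the first comment marker with str.split, tokenizing in one regex pass (re.findall with alternatives <=>|=>|. ), and filtering out whitespace tokens at the end.
import Mathlib
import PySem

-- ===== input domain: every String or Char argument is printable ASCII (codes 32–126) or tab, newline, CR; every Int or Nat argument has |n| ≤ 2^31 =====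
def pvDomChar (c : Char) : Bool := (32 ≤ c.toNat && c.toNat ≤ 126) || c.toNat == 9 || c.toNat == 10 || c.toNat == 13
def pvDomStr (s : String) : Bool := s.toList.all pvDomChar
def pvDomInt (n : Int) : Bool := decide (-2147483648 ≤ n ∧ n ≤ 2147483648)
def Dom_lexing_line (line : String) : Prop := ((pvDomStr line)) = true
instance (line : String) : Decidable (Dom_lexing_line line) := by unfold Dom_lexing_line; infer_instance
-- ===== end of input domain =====

-- B replaces A's per-position operator-prefix scan with: truncate at the first '#',
-- one tokenize pass (regex alternatives <=> | => | . in order), then drop whitespace tokens.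
-- ===== PORT A =====
-- Port works on List Char; Python's line[i:] suffix and startswith are exact here.
def pvOPERATOR : List (List Char) :=
  [['('], [')'], ['!'], ['+'], ['|'], ['^'], ['=', '>'], ['<', '=', '>']]

-- for opera in OPERATOR: if line.startswith(opera): return opera ; return ""
def pvCheckGo : List (List Char) → List Char → List Char
  | [], _ => []
  | op :: ops, cs => if PySem.Chars.startswith cs op then op else pvCheckGo ops cs

def check_if_operator (cs : List Char) : List Char :=
  pvCheckGo pvOPERATOR cs

-- needed by pvALoop's termination: a matched operator is nonempty
theorem pvCheck_len (cs : List Char) (h : check_if_operator cs ≠ []) :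
    1 ≤ (check_if_operator cs).length := by
  unfold check_if_operator pvOPERATOR at *
  simp only [pvCheckGo] at *
  split_ifs at * <;> simp_all

-- the while loop of A: i is represented by the remaining suffix of the line
def pvALoop : List Char → List String → List String
  | [], tokens => tokens
  | c :: rest, tokens =>
    let op := check_if_operator (c :: rest)
    if op ≠ [] then pvALoop ((c :: rest).drop op.length) (tokens ++ [String.ofList op])
    else if c = '#' then tokens
    else if PySem.Chars.strIsspace [c] = false then pvALoop rest (tokens ++ [String.ofList [c]])
    else pvALoop rest tokens
termination_by cs _ => cs.length
decreasing_by
  · have h1 := pvCheck_len (c :: rest) (by assumption)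
    simp [List.length_drop]
    omega
  · simp
  · simp

def lexing_line (line : String) : List String :=
  pvALoop line.toList []

-- ===== PORT B =====
-- re.findall(r'<=>|=>|.', prefix, re.DOTALL) ported as this recursion: at each position
-- the alternatives are tried left to right, '.' with DOTALL matches any one char — exact.
def pvBTok : List Char → List String
  | [] => []
  | '<' :: '=' :: '>' :: r => String.ofList ['<', '=', '>'] :: pvBTok r
  | '=' :: '>' :: r => String.ofList ['=', '>'] :: pvBTok r
  | c :: r => String.ofList [c] :: pvBTok r

def lexing_line_alt (line : String) : List String :=
  -- prefix = line.split('#', 1)[0]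
  let pre := (PySem.Chars.splitOnMax line.toList ['#'] 1).headD []
  -- [t for t in findall if not t.isspace()]
  (pvBTok pre).filter (fun t => !(PySem.Chars.strIsspace t.toList))

-- ===== PRECONDITION & SPEC =====
def Spec_lexing_line (line : String) (out : List String) : Prop := out = lexing_line_alt line
instance (line : String) (out : List String) : Decidable (Spec_lexing_line line out) := by unfold Spec_lexing_line; infer_instance

-- ===== CLAIM (what is proved, stated in full; the proofs are below) =====
def Claim_equal_lexing_line : Prop := ∀ (line : String), Dom_lexing_line line → Spec_lexing_line line (lexing_line line)

-- ===== LEMMAS AND PROOFS =====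

theorem pvSplit_go_zero (l : List Char) (fuel : Nat) (cur : List Char) (acc : List (List Char)) :
    PySem.Chars.splitOnMax.go ['#'] fuel 0 l cur acc = ((cur.reverse ++ l) :: acc).reverse := by
  cases fuel <;> cases l <;> simp [PySem.Chars.splitOnMax.go]

theorem pvSplit_go_head (l : List Char) : ∀ (fuel : Nat) (cur : List Char),
    l.length < fuel →
    (PySem.Chars.splitOnMax.go ['#'] fuel 1 l cur []).headD [] =
      cur.reverse ++ l.takeWhile (fun x => !decide (x = '#')) := by
  induction l with
  | nil =>
    intro fuel cur h
    cases fuel with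
    | zero => omega
    | succ f => simp [PySem.Chars.splitOnMax.go]
  | cons c rest ih =>
    intro fuel cur h
    cases fuel with
    | zero => omega
    | succ f =>
      by_cases hc : c = '#'
      · subst hc
        simp only [PySem.Chars.splitOnMax.go, List.isPrefixOf]
        simp [pvSplit_go_zero, List.takeWhile]
      · rw [PySem.Chars.splitOnMax.go]
        have hp : List.isPrefixOf ['#'] (c :: rest) = false := by
          simp [List.isPrefixOf]; intro h'; exact absurd h'.symm hc
        simp only [hp, Bool.false_eq_true, if_false, if_neg (one_ne_zero)]
        rw [ih f (c :: cur) (by simp at h; omega)]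
        simp [List.takeWhile, hc]

theorem pvSplit_head (cs : List Char) :
    (PySem.Chars.splitOnMax cs ['#'] 1).headD [] = cs.takeWhile (fun x => !decide (x = '#')) := by
  rw [PySem.Chars.splitOnMax]
  have := pvSplit_go_head cs (cs.length + 1) [] (by omega)
  simpa using this

theorem pvCheck_eq (c : Char) (rest : List Char) :
    check_if_operator (c :: rest) =
      if c = '(' ∨ c = ')' ∨ c = '!' ∨ c = '+' ∨ c = '|' ∨ c = '^' then [c]
      else if c = '=' ∧ ['>'].isPrefixOf rest then ['=', '>']
      else if c = '<' ∧ ['=', '>'].isPrefixOf rest then ['<', '=', '>']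
      else [] := by
  unfold check_if_operator pvOPERATOR
  simp only [pvCheckGo, PySem.Chars.startswith, List.isPrefixOf]
  split_ifs <;> simp_all <;> tauto



theorem pvBTok_cons (c : Char) (r : List Char)
    (h1 : ¬(c = '<' ∧ ['=', '>'] <+: r))
    (h2 : ¬(c = '=' ∧ ['>'] <+: r)) :
    pvBTok (c :: r) = String.ofList [c] :: pvBTok r := by
  rw [pvBTok.eq_def]
  split <;> simp_all

theorem pvBTok_cons' (c : Char) (r : List Char) (h1 : c ≠ '<') (h2 : c ≠ '=') :
    pvBTok (c :: r) = String.ofList [c] :: pvBTok r := by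
  apply pvBTok_cons <;> rintro ⟨hc, -⟩ <;> [exact h1 hc; exact h2 hc]

theorem pvMain : ∀ (n : Nat) (cs : List Char), cs.length ≤ n → ∀ (tokens : List String),
    pvALoop cs tokens =
      tokens ++ (pvBTok (cs.takeWhile (fun x => !decide (x = '#')))).filter
        (fun t => !(PySem.Chars.strIsspace t.toList)) := by
  intro n
  induction n with
  | zero =>
    intro cs h tokens
    have : cs = [] := by cases cs <;> simp_all
    subst this
    simp [pvALoop, pvBTok]
  | succ n ih =>
    intro cs h tokens
    match cs with
    | [] => simp [pvALoop, pvBTok]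
    | c :: rest =>
      have hlen : rest.length ≤ n := by simp at h; omega
      by_cases h6 : c = '(' ∨ c = ')' ∨ c = '!' ∨ c = '+' ∨ c = '|' ∨ c = '^'
      · -- single-char operator token
        have hck : check_if_operator (c :: rest) = [c] := by
          rw [pvCheck_eq]; simp [h6]
        have hne : c ≠ '#' := by rcases h6 with h|h|h|h|h|h <;> subst h <;> decide
        have hsp : PySem.Chars.strIsspace [c] = false := by
          rcases h6 with h|h|h|h|h|h <;> subst h <;> decide
        have hbt := pvBTok_cons' c (rest.takeWhile (fun x => !decide (x = '#')))
          (by rintro rfl; simp at h6) (by rintro rfl; simp at h6)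
        rw [pvALoop]
        simp only [hck, ne_eq, reduceCtorEq, not_false_eq_true, if_true, List.length_cons,
          List.length_nil, List.drop_succ_cons, List.drop_zero]
        rw [ih rest hlen]
        simp [List.takeWhile, hne, hbt, hsp]
      · by_cases heq : c = '='
        · subst heq
          by_cases hpre : ['>'] <+: rest
          · obtain ⟨r', hr⟩ := hpre
            rw [List.singleton_append] at hr
            subst hr
            have hck : check_if_operator ('=' :: '>' :: r') = ['=', '>'] := by
              rw [pvCheck_eq]; simp [List.isPrefixOf]
            rw [pvALoop]
            simp only [hck, ne_eq, reduceCtorEq, not_false_eq_true, if_true, List.length_cons,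
              List.length_nil, List.drop_succ_cons, List.drop_zero]
            have hlen' : r'.length ≤ n := by simp at h; omega
            rw [ih r' hlen']
            simp [List.takeWhile, pvBTok, List.filter_cons, String.toList_ofList,
              show PySem.Chars.strIsspace ['=', '>'] = false from by decide]
          · have hck : check_if_operator ('=' :: rest) = [] := by
              rw [pvCheck_eq]; simp [List.isPrefixOf_iff_prefix, hpre]
            have hbt := pvBTok_cons '=' (rest.takeWhile (fun x => !decide (x = '#')))
              (by rintro ⟨hc, -⟩; exact absurd hc (by decide))
              (by rintro ⟨-, hp⟩; exact hpre (hp.trans (List.takeWhile_prefix _)))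
            rw [pvALoop]
            simp only [hck, ne_eq, not_true_eq_false, if_false, reduceIte]
            rw [ih rest hlen]
            simp [List.takeWhile, hbt, List.filter_cons, String.toList_ofList,
              show PySem.Chars.strIsspace ['='] = false from by decide]
        · by_cases hlt : c = '<'
          · subst hlt
            by_cases hpre : ['=', '>'] <+: rest
            · obtain ⟨r', hr⟩ := hpre
              simp only [List.cons_append, List.nil_append] at hr
              subst hr
              have hck : check_if_operator ('<' :: '=' :: '>' :: r') = ['<', '=', '>'] := by
                rw [pvCheck_eq]; simp [List.isPrefixOf]
              rw [pvALoop]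
              simp only [hck, ne_eq, reduceCtorEq, not_false_eq_true, if_true, List.length_cons,
                List.length_nil, List.drop_succ_cons, List.drop_zero]
              have hlen' : r'.length ≤ n := by simp at h; omega
              rw [ih r' hlen']
              simp [List.takeWhile, pvBTok, List.filter_cons, String.toList_ofList,
                show PySem.Chars.strIsspace ['<', '=', '>'] = false from by decide]
            · have hck : check_if_operator ('<' :: rest) = [] := by
                rw [pvCheck_eq]; simp [List.isPrefixOf_iff_prefix, hpre]
              have hbt := pvBTok_cons '<' (rest.takeWhile (fun x => !decide (x = '#')))
                (by rintro ⟨-, hp⟩; exact hpre (hp.trans (List.takeWhile_prefix _)))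
                (by rintro ⟨hc, -⟩; exact absurd hc (by decide))
              rw [pvALoop]
              simp only [hck, ne_eq, not_true_eq_false, if_false, reduceIte]
              rw [ih rest hlen]
              simp [List.takeWhile, hbt, List.filter_cons, String.toList_ofList,
                show PySem.Chars.strIsspace ['<'] = false from by decide]
          · -- no operator matches at this position
            have hck : check_if_operator (c :: rest) = [] := by
              rw [pvCheck_eq]; simp [h6, heq, hlt]
            rw [pvALoop]
            simp only [hck, ne_eq, not_true_eq_false, if_false, reduceIte]
            by_cases hhash : c = '#'
            · subst hhash
              simp [List.takeWhile, pvBTok]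
            · have hbt := pvBTok_cons' c (rest.takeWhile (fun x => !decide (x = '#'))) hlt heq
              cases hx : PySem.Chars.strIsspace [c] with
              | false =>
                simp only [hhash, if_false, hx, reduceIte]
                rw [ih rest hlen]
                simp [List.takeWhile, hhash, hbt, hx, List.filter_cons, String.toList_ofList]
              | true =>
                have ht : List.takeWhile (fun x => !decide (x = '#')) (c :: rest) =
                    c :: List.takeWhile (fun x => !decide (x = '#')) rest := by
                  simp [List.takeWhile, hhash]
                simp only [hhash, if_false, hx, reduceIte]
                rw [ht, hbt, List.filter_cons]
                simp only [String.toList_ofList, hx, Bool.not_true, Bool.false_eq_true, if_false,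
                  reduceIte]
                exact ih rest hlen tokens

-- ===== VERDICT (by name: the statement is the Claim_ definition above) =====
theorem lexing_line_spec : Claim_equal_lexing_line := by
  intro line _
  unfold Spec_lexing_line lexing_line lexing_line_alt
  rw [pvSplit_head]
  rw [pvMain line.toList.length line.toList le_rfl []]
  simp
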